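-- pv_equiv track=rewrite | github.com/az1k-dev/ShkolkovoHomework | Homework/1/30.py | is_transitive_directed
-- ===== SOURCE A (Python) =====
-- def is_transitive_directed(matrix):
--     n = len(matrix)
--
--     for i in range(n):
--         for j in range(n):
--             for s in range(n):
--                 if i == s:
--                     continue
--                 if matrix[i][j] and matrix[j][s] and not matrix[i][s]:
--                     return False
--
--     return True
-- ===== SOURCE B (Python) =====
-- def is_transitive_directed(matrix):
--     n = len(matrix)
--     rows = [[j for j, v in enumerate(row[:n]) if v] for row in matrix]
--     for i in range(n):
--         reach = set(rows[i])
--         for j in rows[i]: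
--             for s in rows[j]:
--                 if s != i and s not in reach:
--                     return False
--     return True
-- ===== Notes on version B (the rewrite author's own statement) =====
-- stated objective: faster
-- what changed: B precomputes adjacency lists (indices of truthy entries per row, truncated to n) and checks transitivity by iterating only over existing edges with a set for O(1) reachability membership, instead of A's dense triple loop over all index triples.
-- outside the precondition, e.g. on is_transitive_directed([[1, 1, 0], [0, 0, 1], [5]]): A returns False, B returns False
import Mathlib
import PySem

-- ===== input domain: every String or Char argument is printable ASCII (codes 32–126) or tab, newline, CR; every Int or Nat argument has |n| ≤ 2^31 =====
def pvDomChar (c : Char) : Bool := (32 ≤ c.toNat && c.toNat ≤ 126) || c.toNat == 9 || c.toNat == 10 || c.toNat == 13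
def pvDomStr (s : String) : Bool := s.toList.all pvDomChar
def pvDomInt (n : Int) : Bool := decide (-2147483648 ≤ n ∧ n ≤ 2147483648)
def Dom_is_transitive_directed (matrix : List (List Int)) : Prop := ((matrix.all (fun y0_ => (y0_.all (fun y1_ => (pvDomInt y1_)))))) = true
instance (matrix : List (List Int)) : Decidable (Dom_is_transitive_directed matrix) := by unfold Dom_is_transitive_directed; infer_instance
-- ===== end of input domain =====

-- B replaces A's dense triple loop over all index triples by precomputed adjacency
-- lists scanned edge-by-edge with a set membership test (alternative algorithm,
-- same return value; equivalence proved on Pre_).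

-- ===== PORT A =====
-- matrix[i][j] etc. accessed with indices 0 ≤ i < n; inside Pre_ these are always
-- in range, so pyGetD's default is never used.
def is_transitive_directed (matrix : List (List Int)) : Bool :=
  let n : Int := matrix.length
  (PySem.List.pyRange 0 n 1).all fun i =>
    (PySem.List.pyRange 0 n 1).all fun j =>
      (PySem.List.pyRange 0 n 1).all fun s =>
        if i == s then true
        else !(decide (PySem.List.pyGetD (PySem.List.pyGetD matrix i []) j 0 ≠ 0) &&
               decide (PySem.List.pyGetD (PySem.List.pyGetD matrix j []) s 0 ≠ 0) &&
               !decide (PySem.List.pyGetD (PySem.List.pyGetD matrix i []) s 0 ≠ 0))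

-- ===== PORT B =====
-- rows[i] = [j for j, v in enumerate(row[:n]) if v]: indices of truthy entries.
def pvRows (matrix : List (List Int)) : List (List Int) :=
  matrix.map (fun row =>
    (PySem.List.enumerate (PySem.List.slice row none (some (matrix.length : Int))) 0).filterMap
      (fun p => if p.2 ≠ 0 then some p.1 else none))

def is_transitive_directed_alt (matrix : List (List Int)) : Bool :=
  let n : Int := matrix.length
  let rows := pvRows matrix
  (PySem.List.pyRange 0 n 1).all fun i =>
    let reach := PySem.Set.ofList (PySem.List.pyGetD rows i [])
    (PySem.List.pyGetD rows i []).all fun j =>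
      (PySem.List.pyGetD rows j []).all fun s =>
        s == i || decide (s ∈ reach)

-- ===== PRECONDITION & SPEC =====
-- Pre_ restricts to matrices whose rows all have length ≥ n; on ragged matrices A
-- raises IndexError except in corner scans (n ≤ 1, or an early False returned
-- before a short row is reached) where A happens to return and B agrees anyway.
def Pre_is_transitive_directed (matrix : List (List Int)) : Prop :=
  ∀ row ∈ matrix, matrix.length ≤ row.length
instance (matrix : List (List Int)) : Decidable (Pre_is_transitive_directed matrix) := by
  unfold Pre_is_transitive_directed; infer_instance

def pvWitness_is_transitive_directed : List (List Int) := [[1, 1], [0, 1]]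

def Spec_is_transitive_directed (matrix : List (List Int)) (out : Bool) : Prop := out = is_transitive_directed_alt matrix
instance (matrix : List (List Int)) (out : Bool) : Decidable (Spec_is_transitive_directed matrix out) := by unfold Spec_is_transitive_directed; infer_instance

-- ===== CLAIM (what is proved, stated in full; the proofs are below) =====
def Claim_equal_is_transitive_directed : Prop := ∀ (matrix : List (List Int)), Dom_is_transitive_directed matrix → Pre_is_transitive_directed matrix → Spec_is_transitive_directed matrix (is_transitive_directed matrix)

-- ===== LEMMAS AND PROOFS =====

-- total indexing on a nonnegative in-range index
theorem pyGetD_idx {α : Type} (xs : List α) (d : α) (i : Int) (h0 : 0 ≤ i)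
    (h : i.toNat < xs.length) : PySem.List.pyGetD xs i d = xs[i.toNat] := by
  have hcast : i = ((i.toNat : Nat) : Int) := by omega
  have h1 : PySem.List.pyGetD xs i d = xs.getD i.toNat d := by
    conv_lhs => rw [hcast]
    rw [PySem.List.pyGetD_natCast]
  rw [h1]
  exact List.getD_eq_getElem xs d h

-- membership in B's adjacency list rows[j] ↔ index in range with a truthy entry
theorem pvRows_mem (matrix : List (List Int))
    (hpre : Pre_is_transitive_directed matrix) (j s : Int)
    (hj0 : 0 ≤ j) (hjn : j < (matrix.length : Int)) :
    s ∈ PySem.List.pyGetD (pvRows matrix) j [] ↔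
      (0 ≤ s ∧ s < (matrix.length : Int) ∧
        PySem.List.pyGetD (PySem.List.pyGetD matrix j []) s 0 ≠ 0) := by
  have hjn' : j.toNat < matrix.length := by omega
  have hrowget : PySem.List.pyGetD matrix j [] = matrix[j.toNat] :=
    pyGetD_idx matrix [] j hj0 hjn'
  have hlen : matrix.length ≤ (matrix[j.toNat]).length :=
    hpre _ (List.getElem_mem hjn')
  have hmap : PySem.List.pyGetD (pvRows matrix) j [] =
      (PySem.List.enumerate (PySem.List.slice (matrix[j.toNat]) none (some (matrix.length : Int))) 0).filterMap
        (fun p => if p.2 ≠ 0 then some p.1 else none) := by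
    unfold pvRows
    rw [pyGetD_idx _ [] j hj0 (by simpa using hjn')]
    simp only [List.getElem_map]
  have hslice : PySem.List.slice (matrix[j.toNat]) none (some (matrix.length : Int)) =
      (matrix[j.toNat]).take matrix.length := by
    simp [PySem.List.slice_to_natCast]
  rw [hmap, hslice]
  constructor
  · intro hs
    rcases List.mem_filterMap.mp hs with ⟨p, hp, hps⟩
    rcases Iff.mp (PySem.List.mem_enumerate_iff _ _ _) hp with ⟨k, hk, rfl⟩
    have hk' : k < matrix.length := by
      have h2 := hk
      simp only [List.length_take] at h2
      omega
    dsimp only at hps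
    by_cases hz : ((matrix[j.toNat]).take matrix.length)[k] ≠ 0
    · rw [if_pos hz] at hps
      have hs1 : (0 : Int) + k = s := Option.some.inj hps
      have hval : ((matrix[j.toNat]).take matrix.length)[k] = (matrix[j.toNat])[k]'(by omega) := by
        simp [List.getElem_take]
      refine ⟨by omega, by omega, ?_⟩
      rw [hrowget, pyGetD_idx _ 0 s (by omega) (by omega)]
      have hsk : s.toNat = k := by omega
      simp only [hsk]
      rw [hval] at hz
      exact hz
    · rw [if_neg hz] at hps
      simp at hps
  · rintro ⟨hs0, hsn, hval⟩
    have hsn' : s.toNat < matrix.length := by omega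
    have hvget : PySem.List.pyGetD (PySem.List.pyGetD matrix j []) s 0 =
        (matrix[j.toNat])[s.toNat]'(by omega) := by
      rw [hrowget, pyGetD_idx _ 0 s hs0 (by omega)]
    have htk : (((matrix[j.toNat]).take matrix.length).length) = matrix.length := by
      simp only [List.length_take]
      omega
    refine List.mem_filterMap.mpr
      ⟨((0 : Int) + s.toNat, (((matrix[j.toNat]).take matrix.length))[s.toNat]'(by omega)), ?_, ?_⟩
    · exact Iff.mpr (PySem.List.mem_enumerate_iff _ _ _) ⟨s.toNat, by omega, rfl⟩
    · have hval' : (((matrix[j.toNat]).take matrix.length))[s.toNat]'(by omega) =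
          (matrix[j.toNat])[s.toNat]'(by omega) := by
        simp [List.getElem_take]
      rw [hvget] at hval
      dsimp only
      rw [if_pos (by rw [hval']; exact hval)]
      have : (0 : Int) + s.toNat = s := by omega
      rw [this]

theorem is_transitive_eq (matrix : List (List Int))
    (hpre : Pre_is_transitive_directed matrix) :
    is_transitive_directed matrix = is_transitive_directed_alt matrix := by
  unfold is_transitive_directed is_transitive_directed_alt
  rw [Bool.eq_iff_iff]
  simp only [List.all_eq_true, PySem.List.mem_pyRange_one, Bool.or_eq_true, beq_iff_eq,
    decide_eq_true_eq, PySem.Set.mem_ofList]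
  constructor
  · intro hA i hi j hj s hs
    have hjb := (pvRows_mem matrix hpre i j hi.1 hi.2).mp hj
    have hsb := (pvRows_mem matrix hpre j s hjb.1 hjb.2.1).mp hs
    by_cases hise : s = i
    · exact Or.inl hise
    · refine Or.inr ?_
      have h := hA i hi j ⟨hjb.1, hjb.2.1⟩ s ⟨hsb.1, hsb.2.1⟩
      rw [if_neg (show ¬ i = s from fun he => hise he.symm), Bool.not_eq_true'] at h
      have hc : decide (PySem.List.pyGetD (PySem.List.pyGetD matrix i []) s 0 ≠ 0) = true := by
        cases hC : decide (PySem.List.pyGetD (PySem.List.pyGetD matrix i []) s 0 ≠ 0)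
        · rw [decide_eq_true (p := PySem.List.pyGetD (PySem.List.pyGetD matrix i []) j 0 ≠ 0) hjb.2.2,
            decide_eq_true (p := PySem.List.pyGetD (PySem.List.pyGetD matrix j []) s 0 ≠ 0) hsb.2.2,
            hC] at h
          simp at h
        · rfl
      exact (pvRows_mem matrix hpre i s hi.1 hi.2).mpr ⟨hsb.1, hsb.2.1, of_decide_eq_true hc⟩
  · intro hB i hi j hj s hs
    by_cases hise : i = s
    · rw [if_pos hise]
    · rw [if_neg hise, Bool.not_eq_true']
      by_cases ha : PySem.List.pyGetD (PySem.List.pyGetD matrix i []) j 0 ≠ 0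
      · by_cases hb : PySem.List.pyGetD (PySem.List.pyGetD matrix j []) s 0 ≠ 0
        · have hjmem := (pvRows_mem matrix hpre i j hi.1 hi.2).mpr ⟨hj.1, hj.2, ha⟩
          have hsmem := (pvRows_mem matrix hpre j s hj.1 hj.2).mpr ⟨hs.1, hs.2, hb⟩
          have hc : PySem.List.pyGetD (PySem.List.pyGetD matrix i []) s 0 ≠ 0 := by
            rcases hB i hi j hjmem s hsmem with h | h
            · exact absurd h.symm hise
            · exact ((pvRows_mem matrix hpre i s hi.1 hi.2).mp h).2.2
          simp [ha, hb, hc]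
        · simp [hb]
      · simp [ha]

-- ===== VERDICT (by name: the statement is the Claim_ definition above) =====
theorem is_transitive_directed_spec : Claim_equal_is_transitive_directed := by
  intro matrix _ hpre
  exact is_transitive_eq matrix hpre
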